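-- pv_equiv track=rewrite | github.com/arnavsharma93/shallowparser | preprocessor.py | PruneSentencesPreprocessor
-- ===== SOURCE A (Python) =====
-- def PruneSentencesPreprocessor(X, y):
--     _X = []
--     ytrans = []
--     for x, _y in zip(X, y):
--         hin_found = False
--         en_found = False
--         for obv, label in zip(x, _y):
--             if obv['LANG'] == 'hi':
--                 hin_found = True
--             if obv['LANG'] == 'en':
--                 en_found = True
--             if hin_found and en_found:
--                 _X.append(x)
--                 ytrans.append(_y)
--                 break
--     return _X, ytrans
-- ===== SOURCE B (Python) =====
-- def PruneSentencesPreprocessor(X, y):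
--     # Inverted index: one global pass records, per language tag, the set of
--     # sentence indices containing it; then intersect and select by index.
--     hi_ids = set()
--     en_ids = set()
--     for i, (x, _y) in enumerate(zip(X, y)):
--         for obv, label in zip(x, _y):
--             t = obv.get('LANG')
--             if t == 'hi':
--                 hi_ids.add(i)
--             elif t == 'en':
--                 en_ids.add(i)
--     kept = hi_ids & en_ids
--     pairs = list(zip(X, y))
--     return ([x for i, (x, _) in enumerate(pairs) if i in kept],
--             [_y for i, (_, _y) in enumerate(pairs) if i in kept])
-- ===== Notes on version B (the rewrite author's own statement) =====
-- stated objective: alternative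
-- what changed: Replaces the per-sentence flag loop with early break by a two-phase inverted index: one global pass records, per language tag, the set of sentence indices containing it (tokens read via dict.get), then the two index sets are intersected and the outputs selected by index membership.
import Mathlib
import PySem

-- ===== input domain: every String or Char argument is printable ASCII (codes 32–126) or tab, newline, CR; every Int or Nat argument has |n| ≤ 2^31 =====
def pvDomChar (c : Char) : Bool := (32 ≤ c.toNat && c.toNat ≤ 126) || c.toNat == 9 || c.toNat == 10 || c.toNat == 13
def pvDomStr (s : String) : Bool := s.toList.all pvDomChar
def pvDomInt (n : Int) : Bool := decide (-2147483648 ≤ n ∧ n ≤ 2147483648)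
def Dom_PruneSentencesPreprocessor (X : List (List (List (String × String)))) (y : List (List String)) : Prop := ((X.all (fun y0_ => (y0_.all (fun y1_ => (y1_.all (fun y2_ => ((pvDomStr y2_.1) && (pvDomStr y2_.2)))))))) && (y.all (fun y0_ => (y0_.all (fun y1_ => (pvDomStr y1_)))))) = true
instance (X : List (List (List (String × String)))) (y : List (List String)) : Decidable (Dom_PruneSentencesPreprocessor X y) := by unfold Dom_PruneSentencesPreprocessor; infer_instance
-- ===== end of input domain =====

-- B replaces A's per-sentence flags-with-early-break by a two-phase inverted index
-- (tag -> set of sentence indices, then intersection); equivalence of return values under Pre_.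

-- ===== PORT A =====
-- obv['LANG'] / obv.get('LANG'): first-match association-list lookup, as Option
def pvLang? (obv : List (String × String)) : Option String :=
  (obv.find? (fun r => r.1 == "LANG")).map (·.2)

-- total form used by A's port; exact under Pre_ (every accessed token has the key)
def pvLang (obv : List (String × String)) : String := (pvLang? obv).getD ""

def pvInnerA : List (List (String × String) × String) → Bool → Bool → Bool
  | [], _, _ => false
  | q :: rest, hin, en =>
    let hin' := if pvLang q.1 = "hi" then true else hin
    let en'  := if pvLang q.1 = "en" then true else en
    if hin' && en' then true else pvInnerA rest hin' en'

def PruneSentencesPreprocessor (X : List (List (List (String × String)))) (y : List (List String)) : (List (List (List (String × String)))) × List (List String) :=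
  (List.zip X y).foldl
    (fun acc p =>
      if pvInnerA (List.zip p.1 p.2) false false then (acc.1 ++ [p.1], acc.2 ++ [p.2]) else acc)
    ([], [])

-- ===== PORT B =====
-- phase 1: inverted index — the sets of sentence indices containing tag 'hi' resp. 'en'
def pvIndexSets (pairs : List (List (List (String × String)) × List String)) :
    PySem.Set Int × PySem.Set Int :=
  (PySem.List.enumerate pairs 0).foldl
    (fun s ip =>
      (List.zip ip.2.1 ip.2.2).foldl
        (fun s q =>
          let t := pvLang? q.1
          if t = some "hi" then (PySem.Set.add s.1 ip.1, s.2)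
          else if t = some "en" then (s.1, PySem.Set.add s.2 ip.1)
          else s) s)
    (PySem.Set.empty, PySem.Set.empty)

def PruneSentencesPreprocessor_alt (X : List (List (List (String × String)))) (y : List (List String)) : (List (List (List (String × String)))) × List (List String) :=
  let sets := pvIndexSets (List.zip X y)
  let kept := PySem.Set.inter sets.1 sets.2
  let pairs := List.zip X y
  (((PySem.List.enumerate pairs 0).filter (fun ip => PySem.Set.contains kept ip.1)).map (·.2.1),
   ((PySem.List.enumerate pairs 0).filter (fun ip => PySem.Set.contains kept ip.1)).map (·.2.2))

-- ===== PRECONDITION & SPEC =====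
-- Pre_ holds exactly when Python A returns (no KeyError): every zipped token that A's loop
-- actually reaches — i.e. whose prefix does not already contain both tags — has a 'LANG' key.
def pvSentOk (ts : List (List (String × String) × String)) : Prop :=
  ∀ i < ts.length,
    (pvLang? (ts.getD i ([], "")).1).isSome = true ∨
    ("hi" ∈ (ts.take i).map (fun q => pvLang q.1) ∧ "en" ∈ (ts.take i).map (fun q => pvLang q.1))

def Pre_PruneSentencesPreprocessor (X : List (List (List (String × String)))) (y : List (List String)) : Prop :=
  ∀ p ∈ List.zip X y, pvSentOk (List.zip p.1 p.2)

instance (X : List (List (List (String × String)))) (y : List (List String)) : Decidable (Pre_PruneSentencesPreprocessor X y) := by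
  unfold Pre_PruneSentencesPreprocessor pvSentOk; infer_instance

def pvWitness_PruneSentencesPreprocessor : (List (List (List (String × String)))) × List (List String) :=
  ([[[("LANG", "hi")], [("LANG", "en")]]], [["a", "b"]])

def Spec_PruneSentencesPreprocessor (X : List (List (List (String × String)))) (y : List (List String)) (out : (List (List (List (String × String)))) × List (List String)) : Prop := out = PruneSentencesPreprocessor_alt X y
instance (X : List (List (List (String × String)))) (y : List (List String)) (out : (List (List (List (String × String)))) × List (List String)) : Decidable (Spec_PruneSentencesPreprocessor X y out) := by unfold Spec_PruneSentencesPreprocessor; infer_instance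

-- ===== CLAIM (what is proved, stated in full; the proofs are below) =====
def Claim_equal_PruneSentencesPreprocessor : Prop := ∀ (X : List (List (List (String × String)))) (y : List (List String)), Dom_PruneSentencesPreprocessor X y → Pre_PruneSentencesPreprocessor X y → Spec_PruneSentencesPreprocessor X y (PruneSentencesPreprocessor X y)

-- ===== LEMMAS AND PROOFS =====

-- the per-sentence predicate both algorithms decide
def pvHasTag (ts : List (List (String × String) × String)) (t : String) : Prop :=
  ∃ q ∈ ts, pvLang? q.1 = some t

-- A's inner loop with monotone flags computes "both tags occur"
lemma pvLang_eq_iff (obv : List (String × String)) (t : String) (ht : t ≠ "") :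
    pvLang obv = t ↔ pvLang? obv = some t := by
  rcases h : pvLang? obv with _ | v
  · simp only [pvLang, h, Option.getD_none]
    exact ⟨fun hh => absurd hh.symm ht, fun hh => by cases hh⟩
  · simp [pvLang, h]

lemma pvInnerA_char (l : List (List (String × String) × String)) :
    ∀ hin en, (hin && en) = false →
      (pvInnerA l hin en = true
        ↔ ((hin = true ∨ pvHasTag l "hi") ∧ (en = true ∨ pvHasTag l "en"))) := by
  induction l with
  | nil => intro hin en h; simp only [Bool.and_eq_false_iff] at h
           simp [pvInnerA, pvHasTag]
           rcases h with h | h <;> simp [h]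
  | cons q rest ih =>
    intro hin en h
    have hhi' : pvLang q.1 = "hi" ↔ pvLang? q.1 = some "hi" := pvLang_eq_iff _ _ (by decide)
    have hen' : pvLang q.1 = "en" ↔ pvLang? q.1 = some "en" := pvLang_eq_iff _ _ (by decide)
    have htags : pvHasTag (q :: rest) "hi" ↔ (pvLang? q.1 = some "hi" ∨ pvHasTag rest "hi") := by
      simp [pvHasTag]
    have htage : pvHasTag (q :: rest) "en" ↔ (pvLang? q.1 = some "en" ∨ pvHasTag rest "en") := by
      simp [pvHasTag]
    by_cases hhi : pvLang q.1 = "hi" <;> by_cases hen : pvLang q.1 = "en" <;>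
      cases hin <;> cases en <;>
      simp_all [pvInnerA, ih, htags, htage]

-- A's accumulator loop is filter-then-unzip
lemma pvFoldl_filter_unzip (p : List (List (String × String)) × List String → Bool)
    (l : List (List (List (String × String)) × List String)) :
    ∀ a b, l.foldl (fun acc q => if p q then (acc.1 ++ [q.1], acc.2 ++ [q.2]) else acc) (a, b)
      = (a ++ (l.filter p).map Prod.fst, b ++ (l.filter p).map Prod.snd) := by
  induction l with
  | nil => intro a b; simp
  | cons q rest ih =>
    intro a b
    by_cases hq : p q <;> simp [List.foldl_cons, hq, ih]

-- B's inner fold: membership characterization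
lemma pvInnerB_mem (ts : List (List (String × String) × String)) (i : Int) :
    ∀ (s : PySem.Set Int × PySem.Set Int) (j : Int),
      (j ∈ (ts.foldl
        (fun s q =>
          let t := pvLang? q.1
          if t = some "hi" then (PySem.Set.add s.1 i, s.2)
          else if t = some "en" then (s.1, PySem.Set.add s.2 i)
          else s) s).1 ↔ (j ∈ s.1 ∨ (j = i ∧ pvHasTag ts "hi")))
      ∧
      (j ∈ (ts.foldl
        (fun s q =>
          let t := pvLang? q.1
          if t = some "hi" then (PySem.Set.add s.1 i, s.2)
          else if t = some "en" then (s.1, PySem.Set.add s.2 i)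
          else s) s).2 ↔ (j ∈ s.2 ∨ (j = i ∧ pvHasTag ts "en"))) := by
  induction ts with
  | nil => intro s j; simp [pvHasTag]
  | cons q rest ih =>
    intro s j
    have hch : pvHasTag (q :: rest) "hi" ↔ (pvLang? q.1 = some "hi" ∨ pvHasTag rest "hi") := by
      simp [pvHasTag]
    have hce : pvHasTag (q :: rest) "en" ↔ (pvLang? q.1 = some "en" ∨ pvHasTag rest "en") := by
      simp [pvHasTag]
    refine ⟨?_, ?_⟩
    · rw [List.foldl_cons, (ih _ j).1, hch]
      by_cases hhi : pvLang? q.1 = some "hi"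
      · have hen : ¬ pvLang? q.1 = some "en" := by rw [hhi]; simp
        simp only [hhi, hen]
        simp [PySem.Set.mem_add]
        tauto
      · by_cases hen : pvLang? q.1 = some "en" <;> simp only [hhi, hen] <;> simp
    · rw [List.foldl_cons, (ih _ j).2, hce]
      by_cases hhi : pvLang? q.1 = some "hi"
      · have hen : ¬ pvLang? q.1 = some "en" := by rw [hhi]; simp
        simp only [hhi, hen]
        simp
      · by_cases hen : pvLang? q.1 = some "en" <;> simp only [hhi, hen] <;>
          simp [PySem.Set.mem_add] <;> tauto

-- B's outer fold over the enumerated pairs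
lemma pvIndexSets_mem (l : List (Int × (List (List (String × String)) × List String))) :
    ∀ (s : PySem.Set Int × PySem.Set Int) (j : Int),
      (j ∈ (l.foldl
        (fun s ip =>
          (List.zip ip.2.1 ip.2.2).foldl
            (fun s q =>
              let t := pvLang? q.1
              if t = some "hi" then (PySem.Set.add s.1 ip.1, s.2)
              else if t = some "en" then (s.1, PySem.Set.add s.2 ip.1)
              else s) s) s).1
        ↔ (j ∈ s.1 ∨ ∃ ip ∈ l, ip.1 = j ∧ pvHasTag (List.zip ip.2.1 ip.2.2) "hi"))
      ∧
      (j ∈ (l.foldl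
        (fun s ip =>
          (List.zip ip.2.1 ip.2.2).foldl
            (fun s q =>
              let t := pvLang? q.1
              if t = some "hi" then (PySem.Set.add s.1 ip.1, s.2)
              else if t = some "en" then (s.1, PySem.Set.add s.2 ip.1)
              else s) s) s).2
        ↔ (j ∈ s.2 ∨ ∃ ip ∈ l, ip.1 = j ∧ pvHasTag (List.zip ip.2.1 ip.2.2) "en")) := by
  induction l with
  | nil => intro s j; simp
  | cons ip rest ih =>
    intro s j
    constructor
    · rw [List.foldl_cons, (ih _ j).1, (pvInnerB_mem _ _ _ j).1]
      simp only [List.mem_cons]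
      constructor
      · rintro ((h | h) | ⟨p, hp, h⟩)
        · exact Or.inl h
        · exact Or.inr ⟨ip, Or.inl rfl, h.1.symm, h.2⟩
        · exact Or.inr ⟨p, Or.inr hp, h⟩
      · rintro (h | ⟨p, (rfl | hp), h⟩)
        · exact Or.inl (Or.inl h)
        · exact Or.inl (Or.inr ⟨h.1.symm, h.2⟩)
        · exact Or.inr ⟨p, hp, h⟩
    · rw [List.foldl_cons, (ih _ j).2, (pvInnerB_mem _ _ _ j).2]
      simp only [List.mem_cons]
      constructor
      · rintro ((h | h) | ⟨p, hp, h⟩)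
        · exact Or.inl h
        · exact Or.inr ⟨ip, Or.inl rfl, h.1.symm, h.2⟩
        · exact Or.inr ⟨p, Or.inr hp, h⟩
      · rintro (h | ⟨p, (rfl | hp), h⟩)
        · exact Or.inl (Or.inl h)
        · exact Or.inl (Or.inr ⟨h.1.symm, h.2⟩)
        · exact Or.inr ⟨p, hp, h⟩

-- indices in an enumeration are determined: (j, p) ∈ enumerate l 0 fixes p
lemma pvEnum_det {α : Type} (l : List α) (j : Int) (p p' : α)
    (h : (j, p) ∈ PySem.List.enumerate l 0) (h' : (j, p') ∈ PySem.List.enumerate l 0) : p = p' := by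
  rw [PySem.List.mem_enumerate_iff] at h h'
  obtain ⟨k, hk, hp⟩ := h
  obtain ⟨k', hk', hp'⟩ := h'
  have h1 : (0 : Int) + k = j := congrArg Prod.fst hp |>.symm
  have h2 : (0 : Int) + k' = j := congrArg Prod.fst hp' |>.symm
  have : k = k' := by omega
  subst this
  have := (congrArg Prod.snd hp).trans (congrArg Prod.snd hp').symm
  exact this

-- map .2 of an enumerate-filter whose predicate only looks at the element
lemma pvEnumFilterMap {α : Type} (q : α → Bool) (l : List α) :
    ∀ s : Int, ((PySem.List.enumerate l s).filter (fun ip => q ip.2)).map (·.2) = l.filter q := by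
  induction l with
  | nil => intro s; simp [PySem.List.enumerate_nil]
  | cons a rest ih =>
    intro s
    rw [PySem.List.enumerate_cons]
    by_cases hq : q a <;> simp [List.filter_cons, hq, ih]

-- ===== VERDICT (by name: the statement is the Claim_ definition above) =====
theorem PruneSentencesPreprocessor_spec : Claim_equal_PruneSentencesPreprocessor := by
  intro X y _ _
  unfold Spec_PruneSentencesPreprocessor PruneSentencesPreprocessor PruneSentencesPreprocessor_alt
  rw [pvFoldl_filter_unzip]
  simp only [List.nil_append]
  set pairs := List.zip X y with hpairs
  set sets := pvIndexSets pairs with hsets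
  set kept := PySem.Set.inter sets.1 sets.2 with hkept
  have hfilter :
      (PySem.List.enumerate pairs 0).filter (fun ip => PySem.Set.contains kept ip.1)
        = (PySem.List.enumerate pairs 0).filter
            (fun ip => pvInnerA (List.zip ip.2.1 ip.2.2) false false) := by
    apply List.filter_congr
    intro ip hip
    have hmem1 := (pvIndexSets_mem (PySem.List.enumerate pairs 0) (PySem.Set.empty, PySem.Set.empty) ip.1).1
    have hmem2 := (pvIndexSets_mem (PySem.List.enumerate pairs 0) (PySem.Set.empty, PySem.Set.empty) ip.1).2
    have hc : PySem.Set.contains kept ip.1 = true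
        ↔ (pvHasTag (List.zip ip.2.1 ip.2.2) "hi" ∧ pvHasTag (List.zip ip.2.1 ip.2.2) "en") := by
      rw [hkept, PySem.Set.contains_iff, PySem.Set.mem_inter]
      rw [hsets, pvIndexSets, hmem1, hmem2]
      simp only [PySem.Set.empty, List.not_mem_nil, false_or]
      constructor
      · rintro ⟨⟨p1, hp1, hj1, h1⟩, ⟨p2, hp2, hj2, h2⟩⟩
        have e1 : p1.2 = ip.2 :=
          pvEnum_det pairs ip.1 p1.2 ip.2 (by rw [← hj1]; simpa using hp1) (by simpa using hip)
        have e2 : p2.2 = ip.2 :=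
          pvEnum_det pairs ip.1 p2.2 ip.2 (by rw [← hj2]; simpa using hp2) (by simpa using hip)
        rw [e1] at h1; rw [e2] at h2
        exact ⟨h1, h2⟩
      · rintro ⟨h1, h2⟩
        exact ⟨⟨ip, hip, rfl, h1⟩, ⟨ip, hip, rfl, h2⟩⟩
    rw [Bool.eq_iff_iff, hc, pvInnerA_char _ false false rfl]
    simp
  rw [hfilter]
  have h1 := pvEnumFilterMap (fun p => pvInnerA (List.zip p.1 p.2) false false) pairs 0
  rw [← h1]
  simp [List.map_map, Function.comp_def]
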